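-- pv_equiv track=rewrite | github.com/fairscape/datasheet-builder | rocrate/base.py | get_date_range
-- ===== SOURCE A (Python) =====
-- def get_date_range(items):
--     """Get the date range for a list of items"""
--     dates = []
--     for item in items:
--         date = item.get("datePublished", "")
--         if not date:
--             date = item.get("dateModified", "")
--             if not date:
--                 date = item.get("dateCreated", "")
--
--         if date:
--             dates.append(date)
--
--     if not dates:
--         return "Unknown"
--
--     return f"{min(dates)} to {max(dates)}"
-- ===== SOURCE B (Python) =====
-- def get_date_range(items):
--     """Get the date range for a list of items"""
--     lo = hi = None
--     for item in items:
--         date = (item.get("datePublished", "")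
--                 or item.get("dateModified", "")
--                 or item.get("dateCreated", ""))
--         if not date:
--             continue
--         if lo is None:
--             lo = hi = date
--         else:
--             if date < lo:
--                 lo = date
--             if date > hi:
--                 hi = date
--     if lo is None:
--         return "Unknown"
--     return f"{lo} to {hi}"
-- ===== Notes on version B (the rewrite author's own statement) =====
-- stated objective: simpler
-- what changed: Replaces the build-a-list-then-two-scans (min and max over the collected dates list) with a single pass that keeps running lo/hi strings updated by direct comparison, with no intermediate list.
import Mathlib
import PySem

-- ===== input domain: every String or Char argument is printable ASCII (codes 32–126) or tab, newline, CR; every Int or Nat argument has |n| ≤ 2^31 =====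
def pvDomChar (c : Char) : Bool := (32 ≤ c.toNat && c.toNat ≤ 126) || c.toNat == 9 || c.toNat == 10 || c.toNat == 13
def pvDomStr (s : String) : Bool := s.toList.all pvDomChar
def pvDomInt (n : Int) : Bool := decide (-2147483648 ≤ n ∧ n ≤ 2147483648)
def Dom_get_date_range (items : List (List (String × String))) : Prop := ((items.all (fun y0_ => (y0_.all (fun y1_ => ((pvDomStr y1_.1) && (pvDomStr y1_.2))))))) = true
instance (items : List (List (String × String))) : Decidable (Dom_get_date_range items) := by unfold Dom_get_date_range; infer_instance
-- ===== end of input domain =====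

-- B fuses the list-build-plus-min/max-scans into one pass keeping running lo/hi; return values proved equal.

-- dict.get(k, "") on an association list: first match, "" if absent (shared dict primitive)
def pvGetStr (item : List (String × String)) (k : String) : String :=
  (item.lookup k).getD ""

-- ===== PORT A =====
def get_date_range (items : List (List (String × String))) : String :=
  let dates := items.foldl (fun dates item =>
    let date := pvGetStr item "datePublished"
    let date := if date = "" then
        (let d2 := pvGetStr item "dateModified"
         if d2 = "" then pvGetStr item "dateCreated" else d2)
      else date
    if date ≠ "" then dates ++ [date] else dates) []
  if dates = [] then "Unknown"
  else
    match PySem.List.min? dates (fun x => x), PySem.List.max? dates (fun x => x) with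
    | some lo, some hi => lo ++ " to " ++ hi
    | _, _ => "Unknown"   -- unreachable: dates ≠ []

-- ===== PORT B =====
def pvResolveB (item : List (String × String)) : String :=
  let d := pvGetStr item "datePublished"
  let d := if d = "" then pvGetStr item "dateModified" else d
  if d = "" then pvGetStr item "dateCreated" else d

def pvStepB (st : Option (String × String)) (d : String) : Option (String × String) :=
  if d = "" then st
  else
    match st with
    | none => some (d, d)
    | some (lo, hi) => some ((if d < lo then d else lo), (if hi < d then d else hi))

def get_date_range_alt (items : List (List (String × String))) : String :=
  match items.foldl (fun st item => pvStepB st (pvResolveB item)) none with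
  | none => "Unknown"
  | some (lo, hi) => lo ++ " to " ++ hi

-- ===== PRECONDITION & SPEC =====
def Spec_get_date_range (items : List (List (String × String))) (out : String) : Prop := out = get_date_range_alt items
instance (items : List (List (String × String))) (out : String) : Decidable (Spec_get_date_range items out) := by unfold Spec_get_date_range; infer_instance

-- ===== CLAIM (what is proved, stated in full; the proofs are below) =====
def Claim_equal_get_date_range : Prop := ∀ (items : List (List (String × String))), Dom_get_date_range items → Spec_get_date_range items (get_date_range items)

-- ===== LEMMAS AND PROOFS =====

-- A's resolved date and B's resolved date coincide
theorem resolve_eq (item : List (String × String)) :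
    (let date := pvGetStr item "datePublished"
     if date = "" then
        (let d2 := pvGetStr item "dateModified"
         if d2 = "" then pvGetStr item "dateCreated" else d2)
      else date) = pvResolveB item := by
  unfold pvResolveB
  by_cases h1 : pvGetStr item "datePublished" = "" <;> simp [h1]

-- collecting loop over the resolved dates yields the filtered map
theorem collect_eq (items : List (List (String × String))) (acc : List String) :
    items.foldl (fun dates item =>
        if pvResolveB item = "" then dates else dates ++ [pvResolveB item]) acc
    = acc ++ (items.map pvResolveB).filter (fun d => !(d = "")) := by
  induction items generalizing acc with
  | nil => simp
  | cons it t ih =>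
      simp only [List.foldl_cons, List.map_cons, List.filter_cons]
      by_cases h : pvResolveB it = "" <;> simp [h, ih]

-- A's date-collecting loop in terms of the shared resolver
theorem datesA_eq (items : List (List (String × String))) (acc : List String) :
    items.foldl (fun dates item =>
      let date := pvGetStr item "datePublished"
      let date := if date = "" then
          (let d2 := pvGetStr item "dateModified"
           if d2 = "" then pvGetStr item "dateCreated" else d2)
        else date
      if date ≠ "" then dates ++ [date] else dates) acc
    = acc ++ (items.map pvResolveB).filter (fun d => !(d = "")) := by
  rw [← collect_eq]
  induction items generalizing acc with
  | nil => rfl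
  | cons it t ih =>
      simp only [List.foldl_cons, resolve_eq]
      by_cases h : pvResolveB it = "" <;> simp only [h, ite_true, ite_false, ne_eq,
        not_true_eq_false, not_false_eq_true, if_pos, if_neg] <;> first | exact ih _ | simp [h, ih]

-- B's loop over items = B's step folded over the resolved-date list
theorem foldB_eq (items : List (List (String × String))) (st : Option (String × String)) :
    items.foldl (fun st item => pvStepB st (pvResolveB item)) st
    = (items.map pvResolveB).foldl pvStepB st := by
  induction items generalizing st with
  | nil => rfl
  | cons it t ih => simp [List.foldl_cons, ih]

-- pvStepB skips empty strings: folding over ds equals folding over the filtered ds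
theorem foldB_filter (ds : List String) (st : Option (String × String)) :
    ds.foldl pvStepB st = ((ds.filter (fun d => !(d = ""))).foldl pvStepB st) := by
  induction ds generalizing st with
  | nil => rfl
  | cons d t ih =>
      by_cases h : d = "" <;> simp [List.foldl_cons, List.filter_cons, h, pvStepB, ih]

theorem min_step (lo d : String) : (if d < lo then d else lo) = min lo d := by
  rcases lt_or_ge d lo with h | h
  · rw [if_pos h, min_eq_right h.le]
  · rw [if_neg (not_lt.mpr h), min_eq_left h]

theorem max_step (hi d : String) : (if hi < d then d else hi) = max hi d := by
  rcases lt_or_ge hi d with h | h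
  · rw [if_pos h, max_eq_right h.le]
  · rw [if_neg (not_lt.mpr h), max_eq_left h]

-- over a list of nonempty strings the running pair is (foldl min, foldl max)
theorem foldB_some (ds : List String) (hds : ∀ d ∈ ds, d ≠ "") (lo hi : String) :
    ds.foldl pvStepB (some (lo, hi)) = some (ds.foldl min lo, ds.foldl max hi) := by
  induction ds generalizing lo hi with
  | nil => rfl
  | cons d t ih =>
      have hd : d ≠ "" := hds d (by simp)
      have ht : ∀ x ∈ t, x ≠ "" := fun x hx => hds x (by simp [hx])
      simp only [List.foldl_cons, pvStepB, if_neg hd, min_step, max_step]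
      exact ih ht _ _

-- ===== VERDICT (by name: the statement is the Claim_ definition above) =====
theorem get_date_range_spec : Claim_equal_get_date_range := by
  intro items _
  unfold Spec_get_date_range get_date_range get_date_range_alt
  rw [datesA_eq items [], foldB_eq, foldB_filter]
  simp only [List.nil_append]
  have hmem : ∀ d ∈ (items.map pvResolveB).filter (fun d => !(d = "")), d ≠ "" := by
    intro d hd
    have := List.of_mem_filter hd
    simpa using this
  revert hmem
  generalize (items.map pvResolveB).filter (fun d => !(d = "")) = ds
  intro hmem
  cases ds with
  | nil => rfl
  | cons d t =>
      have hd : d ≠ "" := hmem d (by simp)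
      have ht : ∀ x ∈ t, x ≠ "" := fun x hx => hmem x (by simp [hx])
      simp [pvStepB, if_neg hd, foldB_some t ht d d,
            PySem.List.min?_id_cons, PySem.List.max?_id_cons]
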